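-- pv_equiv track=rewrite | github.com/NeryBarrientos/IPC2_Proyecto1_201807086 | lista_frecuencias.py | encontrar_filas_iguales
-- ===== SOURCE A (Python) =====
-- def encontrar_filas_iguales(matriz):
--     # Encuentra filas iguales en la matriz y las agrega a una lista de grupos de filas iguales
--     filas_iguales = []
--     for i in range(len(matriz)):
--         if i not in [fila for grupo in filas_iguales for fila in grupo]:
--             # Si esta fila no se ha incluido en grupos anteriores
--             grupo = [i]
--             fila_actual = matriz[i]
--             for j in range(i + 1, len(matriz)):
--                 if fila_actual == matriz[j]:
--                     grupo.append(j)
--             if len(grupo) > 1: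
--                 # Si encontramos al menos una fila igual, agregamos el grupo a la lista
--                 filas_iguales.append(grupo)
--     return filas_iguales
-- ===== SOURCE B (Python) =====
-- def encontrar_filas_iguales(matriz):
--     # Group indices by row value in one pass (dict keyed by the row as a tuple),
--     # then keep the groups with more than one index, in first-occurrence order.
--     grupos = {}
--     for i, fila in enumerate(matriz):
--         grupos.setdefault(tuple(fila), []).append(i)
--     return [g for g in grupos.values() if len(g) > 1]
-- ===== Notes on version B (the rewrite author's own statement) =====
-- stated objective: alternative
-- what changed: Replaces the nested index scans (outer loop with a flatten-and-search skip test, inner rescan per unseen row) by a single pass that buckets row indices in a dict keyed by the row tuple and then filters buckets of size > 1.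
import Mathlib
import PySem

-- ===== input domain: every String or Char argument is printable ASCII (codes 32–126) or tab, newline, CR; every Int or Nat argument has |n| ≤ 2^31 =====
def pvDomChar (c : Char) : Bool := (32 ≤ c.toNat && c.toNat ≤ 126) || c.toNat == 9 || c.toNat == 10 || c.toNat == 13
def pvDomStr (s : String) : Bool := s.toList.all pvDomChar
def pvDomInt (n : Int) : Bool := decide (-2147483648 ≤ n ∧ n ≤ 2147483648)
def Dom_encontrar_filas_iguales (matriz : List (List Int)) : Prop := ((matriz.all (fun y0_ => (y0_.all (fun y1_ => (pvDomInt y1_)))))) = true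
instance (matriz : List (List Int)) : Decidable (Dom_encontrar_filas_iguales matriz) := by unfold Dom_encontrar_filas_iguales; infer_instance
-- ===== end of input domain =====

-- B groups row indices with one dict-bucketing pass instead of A's nested index scans (objective: alternative).


-- ===== PORT A =====
def encontrar_filas_iguales (matriz : List (List Int)) : List (List Int) :=
  (PySem.List.pyRange 0 (PySem.List.len matriz) 1).foldl
    (fun filas_iguales i =>
      if (filas_iguales.flatMap id).contains i then
        filas_iguales
      else
        let fila_actual := PySem.List.pyGetD matriz i []
        let grupo := (PySem.List.pyRange (i + 1) (PySem.List.len matriz) 1).foldl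
          (fun grupo j =>
            if fila_actual == PySem.List.pyGetD matriz j [] then grupo ++ [j] else grupo)
          [i]
        if 1 < grupo.length then filas_iguales ++ [grupo] else filas_iguales)
    []

-- ===== PORT B =====
def encontrar_filas_iguales_alt (matriz : List (List Int)) : List (List Int) :=
  let grupos : PySem.Dict (List Int) (List Int) :=
    (PySem.List.enumerate matriz 0).foldl
      (fun grupos p => grupos.modify p.2 [] (fun g => g ++ [p.1]))
      PySem.Dict.empty
  (PySem.Dict.values grupos).filter (fun g => decide (1 < g.length))

-- ===== PRECONDITION & SPEC =====
def Spec_encontrar_filas_iguales (matriz : List (List Int)) (out : List (List Int)) : Prop := out = encontrar_filas_iguales_alt matriz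
instance (matriz : List (List Int)) (out : List (List Int)) : Decidable (Spec_encontrar_filas_iguales matriz out) := by unfold Spec_encontrar_filas_iguales; infer_instance

-- ===== CLAIM (what is proved, stated in full; the proofs are below) =====
def Claim_equal_encontrar_filas_iguales : Prop := ∀ (matriz : List (List Int)), Dom_encontrar_filas_iguales matriz → Spec_encontrar_filas_iguales matriz (encontrar_filas_iguales matriz)

-- ===== LEMMAS AND PROOFS =====

-- indices (as Ints) of the rows of `matriz` equal to `f`, in order
def pvIdxs (matriz : List (List Int)) (f : List Int) : List Int :=
  (((PySem.List.enumerate matriz 0).map (fun p => (p.2, p.1))).filter (fun q => q.1 == f)).map (·.2)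

-- the common intermediate form: groups for the distinct rows of the first k rows, full index lists, filtered
def pvS (matriz : List (List Int)) (k : Nat) : List (List Int) :=
  ((PySem.Set.ofList (matriz.take k)).map (pvIdxs matriz)).filter (fun g => decide (1 < g.length))

-- A's loop body, named for the induction
def pvGrupo (matriz : List (List Int)) (i : Int) : List Int :=
  (PySem.List.pyRange (i + 1) (PySem.List.len matriz) 1).foldl
    (fun grupo j =>
      if PySem.List.pyGetD matriz i [] == PySem.List.pyGetD matriz j [] then grupo ++ [j] else grupo)
    [i]

def pvStepA (matriz : List (List Int)) (filas_iguales : List (List Int)) (i : Int) : List (List Int) :=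
  if (filas_iguales.flatMap id).contains i then
    filas_iguales
  else
    if 1 < (pvGrupo matriz i).length then filas_iguales ++ [pvGrupo matriz i] else filas_iguales

lemma pvA_eq_foldl (matriz : List (List Int)) :
    encontrar_filas_iguales matriz
      = (PySem.List.pyRange 0 (PySem.List.len matriz) 1).foldl (pvStepA matriz) [] := rfl

lemma pvIdxs_eq_filter_range (matriz : List (List Int)) (f : List Int) :
    pvIdxs matriz f
      = (PySem.List.pyRange 0 (matriz.length : Int) 1).filter
          (fun j => PySem.List.pyGetD matriz j [] == f) := by
  unfold pvIdxs
  rw [PySem.List.enumerate_eq_map_pyRange matriz ([] : List Int)]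
  rw [List.map_map, List.filter_map, List.map_map]
  simp [Function.comp_def, PySem.List.len_eq]

lemma pvMem_pvIdxs (matriz : List (List Int)) (f : List Int) (i : Int) :
    i ∈ pvIdxs matriz f ↔ 0 ≤ i ∧ ∃ h : i.toNat < matriz.length, matriz[i.toNat] = f := by
  rw [pvIdxs_eq_filter_range]
  simp only [List.mem_filter, PySem.List.mem_pyRange_one, beq_iff_eq]
  constructor
  · rintro ⟨⟨h0, h1⟩, h2⟩
    have hlt : i.toNat < matriz.length := by omega
    exact ⟨h0, hlt, by rwa [PySem.List.pyGetD_eq_getElem matriz [] h0 h1] at h2⟩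
  · rintro ⟨h0, hlt, heq⟩
    have h1 : i < (matriz.length : Int) := by omega
    exact ⟨⟨h0, h1⟩, by rw [PySem.List.pyGetD_eq_getElem matriz [] h0 h1]; exact heq⟩

lemma pvOne_lt_length {α : Type} {l : List α} {a b : α} (ha : a ∈ l) (hb : b ∈ l)
    (hne : a ≠ b) : 1 < l.length := by
  match l with
  | [] => cases ha
  | [x] =>
      simp only [List.mem_singleton] at ha hb
      exact absurd (ha.trans hb.symm) hne
  | x :: y :: t => simp

lemma pvMem_flatten_pvS (matriz : List (List Int)) (k : Nat) (hk : k < matriz.length) :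
    ((k : Int) ∈ (pvS matriz k).flatMap id) ↔ matriz[k] ∈ matriz.take k := by
  simp only [pvS, List.mem_flatMap, List.mem_filter, List.mem_map, id]
  constructor
  · rintro ⟨g, ⟨⟨f, hf, rfl⟩, -⟩, hk⟩
    rw [pvMem_pvIdxs] at hk
    obtain ⟨-, hlt, heq⟩ := hk
    simp only [Int.toNat_natCast] at heq
    rw [PySem.Set.mem_ofList _ _] at hf
    exact heq ▸ hf
  · intro hr
    obtain ⟨j0, hj0, hval⟩ := List.getElem_of_mem hr
    have hj0k : j0 < k := by
      have := hj0; simp only [List.length_take] at this; omega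
    have hj0n : j0 < matriz.length := lt_of_lt_of_le hj0k (by
      by_contra h
      have : matriz.take k = matriz := List.take_of_length_le (by omega)
      omega)
    have hval' : matriz[j0] = matriz[k] := by
      rw [← List.getElem_take (h := hj0)]; exact hval
    have hmemj : (j0 : Int) ∈ pvIdxs matriz matriz[k] := by
      rw [pvMem_pvIdxs]
      exact ⟨by omega, by simpa using hj0n, by simpa using hval'⟩
    have hmemk : (k : Int) ∈ pvIdxs matriz matriz[k] := by
      rw [pvMem_pvIdxs]
      exact ⟨by omega, by simpa using hk, by simp⟩
    refine ⟨pvIdxs matriz matriz[k], ⟨⟨matriz[k], (PySem.Set.mem_ofList _ _).mpr hr, rfl⟩, ?_⟩, hmemk⟩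
    simpa using pvOne_lt_length hmemj hmemk (by omega)

lemma pvStepA_pvS (matriz : List (List Int)) (k : Nat) (hk : k < matriz.length) :
    pvStepA matriz (pvS matriz k) (k : Int) = pvS matriz (k + 1) := by
  have hofl : PySem.Set.ofList (matriz.take (k + 1))
      = (PySem.Set.ofList (matriz.take k)).add matriz[k] := by
    rw [List.take_add_one, List.getElem?_eq_getElem hk]
    exact PySem.Set.ofList_append_singleton _ _
  by_cases hr : matriz[k] ∈ matriz.take k
  · have hc : ((pvS matriz k).flatMap id).contains (k : Int) = true :=
      List.contains_iff_mem.mpr ((pvMem_flatten_pvS matriz k hk).mpr hr)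
    have hS : pvS matriz (k + 1) = pvS matriz k := by
      unfold pvS
      rw [hofl, PySem.Set.add_of_mem ((PySem.Set.mem_ofList _ _).mpr hr)]
    rw [hS]
    unfold pvStepA
    rw [if_pos hc]
  · have hc : ((pvS matriz k).flatMap id).contains (k : Int) = false := by
      rw [Bool.eq_false_iff]
      intro h
      exact hr ((pvMem_flatten_pvS matriz k hk).mp (List.contains_iff_mem.mp h))
    have hfila : PySem.List.pyGetD matriz (k : Int) [] = matriz[k] := by
      rw [PySem.List.pyGetD_eq_getElem matriz [] (by omega) (by exact_mod_cast hk)]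
      simp
    have hgrupo : pvGrupo matriz (k : Int) = pvIdxs matriz matriz[k] := by
      unfold pvGrupo
      have hfo := PySem.List.foldl_append_if
        (fun j => PySem.List.pyGetD matriz (k : Int) [] == PySem.List.pyGetD matriz j [])
        (id : Int → Int) (PySem.List.pyRange ((k : Int) + 1) (PySem.List.len matriz) 1) [(k : Int)]
      simp only [id_eq, List.map_id] at hfo
      rw [hfo, pvIdxs_eq_filter_range]
      have hkn : (k : Int) ≤ (matriz.length : Int) := by exact_mod_cast hk.le
      have hklt : (k : Int) < (matriz.length : Int) := by exact_mod_cast hk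
      have hnil : (PySem.List.pyRange 0 (k : Int) 1).filter
          (fun j => PySem.List.pyGetD matriz j [] == matriz[k]) = [] := by
        rw [List.filter_eq_nil_iff]
        intro j hj
        rw [PySem.List.mem_pyRange_one] at hj
        obtain ⟨hj0, hjk⟩ := hj
        have hjn : j < (matriz.length : Int) := lt_of_lt_of_le hjk hkn
        rw [PySem.List.pyGetD_eq_getElem matriz [] hj0 hjn]
        simp only [beq_iff_eq]
        intro heq
        apply hr
        rw [← heq]
        have hjk' : j.toNat < k := by omega
        have hgt : matriz[j.toNat] = (matriz.take k)[j.toNat]'(by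
          simp only [List.length_take]; omega) := by
          rw [List.getElem_take]
        rw [hgt]
        exact List.getElem_mem _
      have hkk : (PySem.List.pyGetD matriz (k : Int) [] == matriz[k]) = true := by
        rw [hfila]; simp
      conv_rhs =>
        rw [PySem.List.pyRange_one_append 0 (k : Int) (matriz.length : Int) (by omega) hkn]
        rw [PySem.List.pyRange_one_cons hklt]
        rw [List.filter_append, List.filter_cons, hnil, hkk]
      simp only [if_true, List.nil_append, List.singleton_append, PySem.List.len_eq]
      congr 1
      apply List.filter_congr
      intro j _
      rw [hfila, Bool.beq_comm]
    have hS : pvS matriz (k + 1)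
        = pvS matriz k ++ (if 1 < (pvIdxs matriz matriz[k]).length
            then [pvIdxs matriz matriz[k]] else []) := by
      unfold pvS
      rw [hofl, PySem.Set.add_of_not_mem (by rw [PySem.Set.mem_ofList _ _]; exact hr)]
      rw [List.map_append, List.filter_append]
      congr 1
      simp only [List.map_cons, List.map_nil, List.filter_cons, List.filter_nil]
      by_cases hlen : 1 < (pvIdxs matriz matriz[k]).length
      · simp [hlen]
      · simp [hlen]
    rw [hS]
    unfold pvStepA
    rw [if_neg (by rw [hc]; exact Bool.false_ne_true), hgrupo]
    by_cases hlen : 1 < (pvIdxs matriz matriz[k]).length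
    · rw [if_pos hlen, if_pos hlen]
    · rw [if_neg hlen, if_neg hlen, List.append_nil]

lemma pvA_inv (matriz : List (List Int)) :
    ∀ k : Nat, k ≤ matriz.length →
      (PySem.List.pyRange 0 (k : Int) 1).foldl (pvStepA matriz) [] = pvS matriz k := by
  intro k
  induction k with
  | zero => intro _; simp [pvS]
  | succ k ih =>
      intro hk
      have hk' : k ≤ matriz.length := Nat.le_of_succ_le hk
      have hsplit : PySem.List.pyRange 0 ((k : Int) + 1) 1
          = PySem.List.pyRange 0 (k : Int) 1 ++ [(k : Int)] :=
        PySem.List.pyRange_one_succ_right (by positivity)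
      have : ((k + 1 : Nat) : Int) = (k : Int) + 1 := by push_cast; ring
      rw [this, hsplit, List.foldl_append, ih hk']
      simp only [List.foldl_cons, List.foldl_nil]
      exact pvStepA_pvS matriz k (by omega)

lemma pvB_eq_pvS (matriz : List (List Int)) :
    encontrar_filas_iguales_alt matriz = pvS matriz matriz.length := by
  show (PySem.Dict.values
      ((PySem.List.enumerate matriz 0).foldl
        (fun grupos p => grupos.modify p.2 [] (fun g => g ++ [p.1]))
        PySem.Dict.empty)).filter (fun g => decide (1 < g.length))
    = pvS matriz matriz.length
  have hfold : (PySem.List.enumerate matriz 0).foldl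
        (fun grupos p => grupos.modify p.2 [] (fun g => g ++ [p.1])) PySem.Dict.empty
      = ((PySem.List.enumerate matriz 0).map (fun p => (p.2, p.1))).foldl
        (fun grupos q => grupos.modify q.1 [] (fun g => g ++ [q.2])) PySem.Dict.empty := by
    rw [List.foldl_map]
  rw [hfold]
  have hkeys : (((PySem.List.enumerate matriz 0).map (fun p => (p.2, p.1))).foldl
        (fun grupos q => grupos.modify q.1 [] (fun g => g ++ [q.2])) PySem.Dict.empty).keys
      = PySem.Set.ofList matriz := by
    have h := PySem.Dict.keys_foldl_modify_key
      ((PySem.List.enumerate matriz 0).map (fun p => (p.2, p.1)))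
      Prod.fst ([] : List Int) (fun _ q g => g ++ [q.2]) PySem.Dict.empty
    rw [h, List.map_map]
    have : ((PySem.List.enumerate matriz 0).map (Prod.fst ∘ fun p => (p.2, p.1)))
        = matriz := PySem.List.map_snd_enumerate matriz 0
    rw [this]
    rfl
  have hnd : (((PySem.List.enumerate matriz 0).map (fun p => (p.2, p.1))).foldl
        (fun grupos q => grupos.modify q.1 [] (fun g => g ++ [q.2])) PySem.Dict.empty).keys.Nodup := by
    rw [hkeys]
    exact PySem.Set.nodup_ofList matriz
  rw [PySem.Dict.values_eq_map_keys _ hnd ([] : List Int), hkeys]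
  have hget : ∀ c : List Int,
      (((PySem.List.enumerate matriz 0).map (fun p => (p.2, p.1))).foldl
        (fun grupos q => grupos.modify q.1 [] (fun g => g ++ [q.2])) PySem.Dict.empty).getD c []
      = pvIdxs matriz c := by
    intro c
    have h := PySem.Dict.getD_foldl_modify_append
      ((PySem.List.enumerate matriz 0).map (fun p => (p.2, p.1))) PySem.Dict.empty c
    rw [h]
    simp [pvIdxs, PySem.Dict.getD_empty]
  have hmap : (PySem.Set.ofList matriz).map (fun kk =>
      (((PySem.List.enumerate matriz 0).map (fun p => (p.2, p.1))).foldl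
        (fun grupos q => grupos.modify q.1 [] (fun g => g ++ [q.2])) PySem.Dict.empty).getD kk [])
      = (PySem.Set.ofList matriz).map (pvIdxs matriz) :=
    List.map_congr_left (fun c _ => hget c)
  rw [hmap]
  unfold pvS
  rw [List.take_length]

-- ===== VERDICT (by name: the statement is the Claim_ definition above) =====
theorem encontrar_filas_iguales_spec : Claim_equal_encontrar_filas_iguales := by
  intro matriz _
  unfold Spec_encontrar_filas_iguales
  rw [pvA_eq_foldl, pvB_eq_pvS]
  have := pvA_inv matriz matriz.length le_rfl
  simpa [PySem.List.len_eq] using this
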